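-- pv_equiv track=rewrite | github.com/lics-nara-wu/lics-exp2-2025-sudoh | 24Dec/scripts/wordseg2-evaluate.py | extract_labels_from_unlabeled
-- ===== SOURCE A (Python) =====
-- def extract_labels_from_unlabeled (line):
--     label_list = []
--     for i in range(len(line)):
--         if line[i] == " ":
--             label_list.append("|")
--         elif i > 0 and line[i-1] != " ":
--             label_list.append("-")
--     return label_list
-- ===== SOURCE B (Python) =====
-- def extract_labels_from_unlabeled(line):
--     labels = []
--     for j, tok in enumerate(line.split(" ")):
--         if j > 0:
--             labels.append("|")
--         labels.extend("-" * (len(tok) - 1))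
--     return labels
-- ===== Notes on version B (the rewrite author's own statement) =====
-- stated objective: alternative
-- what changed: B splits the line into tokens with str.split on a single space and emits one boundary label before each non-first token plus len(token)-1 continuation labels per token, instead of A's per-character index scan that inspects line[i] and line[i-1].
import Mathlib
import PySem

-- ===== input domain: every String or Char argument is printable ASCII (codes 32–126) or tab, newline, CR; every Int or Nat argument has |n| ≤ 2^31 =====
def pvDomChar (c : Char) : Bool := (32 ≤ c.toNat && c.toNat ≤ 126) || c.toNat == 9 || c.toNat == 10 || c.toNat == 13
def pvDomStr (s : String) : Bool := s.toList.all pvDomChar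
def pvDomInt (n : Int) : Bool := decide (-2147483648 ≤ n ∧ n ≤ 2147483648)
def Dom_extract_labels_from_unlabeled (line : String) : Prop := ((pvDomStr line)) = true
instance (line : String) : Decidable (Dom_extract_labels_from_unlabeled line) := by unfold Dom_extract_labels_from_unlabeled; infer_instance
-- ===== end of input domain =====

-- B rebuilds the label list from line.split(" ") tokens instead of scanning characters by index:
-- a different decomposition (objective: alternative), same return value on every input.

-- ===== PORT A =====
-- literal transliteration of A: for i in range(len(line)): if line[i]==" " append "|"
-- elif i>0 and line[i-1]!=" " append "-"
def extract_labels_from_unlabeled (line : String) : List String :=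
  (PySem.List.pyRange 0 (PySem.Str.len line) 1).foldl
    (fun label_list i =>
      if PySem.Str.pyGet? line i = some ' ' then label_list ++ ["|"]
      else if i > 0 ∧ PySem.Str.pyGet? line (i - 1) ≠ some ' ' then label_list ++ ["-"]
      else label_list)
    []

-- ===== PORT B =====
-- literal transliteration of B: for j, tok in enumerate(line.split(" ")):
--   if j > 0: labels.append("|"); labels.extend("-" * (len(tok) - 1))
def extract_labels_from_unlabeled_alt (line : String) : List String :=
  match PySem.Str.split? line " " with
  | none => []          -- unreachable: the separator " " is non-empty
  | some tokens =>
      (PySem.List.enumerate tokens).foldl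
        (fun labels jt =>
          (if jt.1 > 0 then labels ++ ["|"] else labels)
            ++ List.replicate (PySem.Str.len jt.2 - 1).toNat "-")
        []

-- ===== PRECONDITION & SPEC =====
def Spec_extract_labels_from_unlabeled (line : String) (out : List String) : Prop := out = extract_labels_from_unlabeled_alt line
instance (line : String) (out : List String) : Decidable (Spec_extract_labels_from_unlabeled line out) := by unfold Spec_extract_labels_from_unlabeled; infer_instance

-- ===== CLAIM (what is proved, stated in full; the proofs are below) =====
def Claim_equal_extract_labels_from_unlabeled : Prop := ∀ (line : String), Dom_extract_labels_from_unlabeled line → Spec_extract_labels_from_unlabeled line (extract_labels_from_unlabeled line)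

-- ===== LEMMAS AND PROOFS =====

-- the common reference function: walk the characters carrying "previous char exists and is not a space"
def pvH (p : Bool) : List Char → List String
  | [] => []
  | c :: cs => (if c = ' ' then ["|"] else if p then ["-"] else []) ++ pvH (c ≠ ' ') cs

-- split on a single space, as (first token, remaining tokens)
def pvSplit : List Char → List Char × List (List Char)
  | [] => ([], [])
  | c :: cs =>
      let r := pvSplit cs
      if c = ' ' then ([], r.1 :: r.2) else (c :: r.1, r.2)

-- dashes for one token
def pvRep (t : List Char) : List String := List.replicate (t.length - 1) "-"

-- ---- A-side: the index walk computes pvH ----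

def pvGA (cs : List Char) (i : Int) : List String :=
  if PySem.List.pyGet? cs i = some ' ' then ["|"]
  else if i > 0 ∧ PySem.List.pyGet? cs (i - 1) ≠ some ' ' then ["-"]
  else []

theorem pvA_flatMap (line : String) :
    extract_labels_from_unlabeled line
      = (PySem.List.pyRange 0 (PySem.Str.len line) 1).flatMap (pvGA line.toList) := by
  unfold extract_labels_from_unlabeled
  rw [show (fun (label_list : List String) (i : Int) =>
      if PySem.Str.pyGet? line i = some ' ' then label_list ++ ["|"]
      else if i > 0 ∧ PySem.Str.pyGet? line (i - 1) ≠ some ' ' then label_list ++ ["-"]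
      else label_list)
    = (fun label_list i => label_list ++ pvGA line.toList i) from ?_]
  · rw [PySem.List.foldl_append_eq_flatMap]; simp
  · funext acc i
    simp only [pvGA, PySem.Str.pyGet?, PySem.Chars.pyGet?_eq_listPyGet?]
    split_ifs <;> simp

theorem pvWalk (cs : List Char) (suf : List Char) (k : Nat)
    (hd : cs.drop k = suf) (hk : k ≤ cs.length) :
    (PySem.List.pyRange (k : Int) (cs.length : Int) 1).flatMap (pvGA cs)
      = pvH (decide (0 < k) && decide (cs[k-1]? ≠ some ' ')) suf := by
  induction suf generalizing k with
  | nil =>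
      have hke : k = cs.length := by
        have := List.length_drop (l := cs) (i := k)
        rw [hd] at this; simp at this; omega
      subst hke
      have hlen : (PySem.List.pyRange (cs.length : Int) (cs.length : Int) 1).length = 0 := by
        rw [PySem.List.length_pyRange_one]; omega
      rw [List.length_eq_zero_iff.mp hlen]
      simp [pvH]
  | cons c suf' ih =>
      have hlt : k < cs.length := by
        by_contra h
        have : cs.drop k = [] := List.drop_eq_nil_of_le (by omega)
        rw [hd] at this; exact absurd this (by simp)
      have hget : cs[k]? = some c := by
        have h0 : (cs.drop k)[0]? = some c := by rw [hd]; rfl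
        simpa [List.getElem?_drop] using h0
      have hdrop : cs.drop (k + 1) = suf' := by
        have h2 : (cs.drop k).drop 1 = suf' := by rw [hd]; rfl
        simpa [List.drop_drop, Nat.add_comm] using h2
      rw [PySem.List.pyRange_one_cons (by exact_mod_cast hlt)]
      rw [List.flatMap_cons]
      have ihh := ih (k + 1) hdrop (by omega)
      push_cast at ihh
      rw [ihh]
      have hhead : pvGA cs (k : Int)
          = (if c = ' ' then ["|"]
             else if (decide (0 < k) && decide (cs[k-1]? ≠ some ' ')) then ["-"] else []) := by
        unfold pvGA
        rw [PySem.List.pyGet?_natCast, hget]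
        by_cases hc : c = ' '
        · simp [hc]
        · simp only [hc, Option.some_inj]
          by_cases hp : 0 < k
          · have : ((k : Int) - 1) = ((k - 1 : Nat) : Int) := by omega
            rw [this, PySem.List.pyGet?_natCast]
            by_cases hq : cs[k-1]? = some ' ' <;> simp [hp, hq]
          · have hk0 : k = 0 := by omega
            subst hk0; simp
      rw [hhead]
      have hnext : (decide (0 < k + 1) && decide (cs[k]? ≠ some ' ')) = decide (c ≠ ' ') := by
        rw [hget]; simp
      simp only [pvH, hnext]

theorem pvA_eq_pvH (line : String) :
    extract_labels_from_unlabeled line = pvH false line.toList := by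
  rw [pvA_flatMap]
  have := pvWalk line.toList line.toList 0 (by simp) (by simp)
  simpa [PySem.Str.len] using this

-- ---- connecting splitOn to pvSplit ----

theorem pvGo_eq (l : List Char) : ∀ (fuel : Nat), l.length ≤ fuel → ∀ (cur : List Char) (acc : List (List Char)),
    PySem.Chars.splitOn.go [' '] fuel l cur acc
      = acc.reverse ++ (cur.reverse ++ (pvSplit l).1) :: (pvSplit l).2 := by
  induction l with
  | nil =>
      intro fuel _ cur acc
      cases fuel <;> simp [PySem.Chars.splitOn.go, pvSplit]
  | cons c rest ih =>
      intro fuel hf cur acc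
      cases fuel with
      | zero => simp at hf
      | succ f =>
          have hf' : rest.length ≤ f := by simp at hf; omega
          by_cases hc : c = ' '
          · subst hc
            have hpr : List.isPrefixOf [' '] (' ' :: rest) = true := by
              simp [List.isPrefixOf]
            simp only [PySem.Chars.splitOn.go, hpr, if_pos]
            rw [show List.drop [' '].length (' ' :: rest) = rest by simp]
            rw [ih f hf' [] (cur.reverse :: acc)]
            simp [pvSplit]
          · have hpr : List.isPrefixOf [' '] (c :: rest) = false := by
              simp only [List.isPrefixOf, Bool.and_true]
              exact beq_eq_false_iff_ne.mpr (Ne.symm hc)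
            simp only [PySem.Chars.splitOn.go, hpr]
            rw [if_neg (by simp)]
            rw [ih f hf' (c :: cur) acc]
            simp [pvSplit, hc]

theorem pvSplitOn_eq (cs : List Char) :
    PySem.Chars.splitOn cs [' '] = (pvSplit cs).1 :: (pvSplit cs).2 := by
  unfold PySem.Chars.splitOn
  rw [pvGo_eq cs (cs.length + 1) (by omega) [] []]
  simp

-- ---- B-side: the token fold computes pvH ----

theorem pvEnum_flatMap {α : Type} (g : Int × α → List String) (ts : List α) (k : Int) (acc : List String) :
    (PySem.List.enumerate ts k).foldl
        (fun labels jt => (if jt.1 > 0 then labels ++ ["|"] else labels) ++ g jt) acc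
      = acc ++ (PySem.List.enumerate ts k).flatMap
          (fun jt => (if jt.1 > 0 then ["|"] else []) ++ g jt) := by
  induction ts generalizing k acc with
  | nil => simp [PySem.List.enumerate_nil]
  | cons t ts ih =>
      rw [PySem.List.enumerate_cons, List.foldl_cons, List.flatMap_cons, ih]
      split_ifs <;> simp

theorem pvEnum_pos (ts : List (List Char)) : ∀ (k : Int), 0 < k →
    (PySem.List.enumerate (ts.map String.ofList) k).flatMap
        (fun jt : Int × String =>
          (if jt.1 > 0 then (["|"] : List String) else [])
            ++ List.replicate (PySem.Str.len jt.2 - 1).toNat "-")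
      = ts.flatMap (fun t => "|" :: pvRep t) := by
  induction ts with
  | nil => intro k _; simp [PySem.List.enumerate_nil]
  | cons t ts ih =>
      intro k hk
      rw [List.map_cons, PySem.List.enumerate_cons, List.flatMap_cons, List.flatMap_cons,
        ih (k + 1) (by omega)]
      simp [hk, pvRep]

theorem pvEnum_zero (t : List Char) (ts : List (List Char)) :
    (PySem.List.enumerate (String.ofList t :: ts.map String.ofList) 0).flatMap
        (fun jt : Int × String =>
          (if jt.1 > 0 then (["|"] : List String) else [])
            ++ List.replicate (PySem.Str.len jt.2 - 1).toNat "-")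
      = pvRep t ++ ts.flatMap (fun t => "|" :: pvRep t) := by
  rw [PySem.List.enumerate_cons, List.flatMap_cons, pvEnum_pos ts (0 + 1) (by norm_num)]
  simp [pvRep]

-- the two simultaneous invariants: the tokens of pvSplit rebuild pvH false / pvH true
theorem pvSplit_pvH (cs : List Char) :
    (pvRep (pvSplit cs).1 ++ (pvSplit cs).2.flatMap (fun t => "|" :: pvRep t) = pvH false cs)
    ∧ (List.replicate (pvSplit cs).1.length "-" ++ (pvSplit cs).2.flatMap (fun t => "|" :: pvRep t) = pvH true cs) := by
  induction cs with
  | nil => simp [pvSplit, pvRep, pvH]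
  | cons c cs ih =>
      obtain ⟨ih1, ih2⟩ := ih
      by_cases hc : c = ' '
      · subst hc
        have hsp : pvSplit (' ' :: cs) = ([], (pvSplit cs).1 :: (pvSplit cs).2) := by
          simp [pvSplit]
        have hHf : pvH false (' ' :: cs) = "|" :: pvH false cs := by simp [pvH]
        have hHt : pvH true (' ' :: cs) = "|" :: pvH false cs := by simp [pvH]
        constructor
        · rw [hsp, hHf, List.flatMap_cons, ← ih1]; simp [pvRep]
        · rw [hsp, hHt, List.flatMap_cons, ← ih1]; simp [pvRep]
      · have hsp : pvSplit (c :: cs) = (c :: (pvSplit cs).1, (pvSplit cs).2) := by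
          simp [pvSplit, hc]
        have hHf : pvH false (c :: cs) = pvH true cs := by simp [pvH, hc]
        have hHt : pvH true (c :: cs) = "-" :: pvH true cs := by simp [pvH, hc]
        constructor
        · rw [hsp, hHf, ← ih2]; simp [pvRep]
        · rw [hsp, hHt, ← ih2]
          simp only [List.length_cons, List.replicate_succ, List.cons_append]

theorem pvB_eq_pvH (line : String) :
    extract_labels_from_unlabeled_alt line = pvH false line.toList := by
  unfold extract_labels_from_unlabeled_alt
  have hs : PySem.Str.split? line " "
      = some ((PySem.Chars.splitOn line.toList [' ']).map String.ofList) := by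
    simp [PySem.Str.split?, PySem.Chars.split?]
  rw [hs]
  simp only
  rw [pvEnum_flatMap, pvSplitOn_eq, List.map_cons, pvEnum_zero]
  simpa using (pvSplit_pvH line.toList).1

-- ===== VERDICT (by name: the statement is the Claim_ definition above) =====
theorem extract_labels_from_unlabeled_spec : Claim_equal_extract_labels_from_unlabeled := by
  intro line _
  unfold Spec_extract_labels_from_unlabeled
  rw [pvA_eq_pvH, pvB_eq_pvH]
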